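-- pv_equiv track=rewrite | github.com/Akshay-Verma-CS/Striver-CP-sheet | Implementation and Constructive/15.py | solve
-- ===== SOURCE A (Python) =====
-- def solve(cost,amount,noOfBanana):
--     billAmount=0
--     for i in range(noOfBanana):
--         currentCost = cost * (i+1)
--         billAmount+=currentCost
--     if billAmount>amount:
--         return billAmount-amount
--     else:
--         return 0
-- ===== SOURCE B (Python) =====
-- def solve(cost, amount, noOfBanana):
--     n = max(noOfBanana, 0)
--     total = cost * (n * (n + 1) // 2)
--     return max(total - amount, 0)
-- ===== Notes on version B (the rewrite author's own statement) =====
-- stated objective: faster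
-- what changed: replaces the O(n) loop summing cost*i with the closed-form triangular sum cost*n*(n+1)//2 and a max instead of the final branch
import Mathlib
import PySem

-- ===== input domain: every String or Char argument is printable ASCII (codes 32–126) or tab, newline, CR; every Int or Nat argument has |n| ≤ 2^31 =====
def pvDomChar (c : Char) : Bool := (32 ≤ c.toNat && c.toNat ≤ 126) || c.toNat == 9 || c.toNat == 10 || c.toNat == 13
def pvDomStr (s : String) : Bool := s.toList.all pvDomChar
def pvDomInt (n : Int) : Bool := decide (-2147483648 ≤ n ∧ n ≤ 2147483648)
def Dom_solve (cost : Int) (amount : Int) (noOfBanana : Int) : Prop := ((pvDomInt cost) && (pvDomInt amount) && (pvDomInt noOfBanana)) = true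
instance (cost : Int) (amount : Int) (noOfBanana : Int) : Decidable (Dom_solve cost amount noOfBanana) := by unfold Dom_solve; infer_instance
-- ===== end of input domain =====

-- B replaces A's O(n) summing loop by the closed-form triangular sum (O(1)).

-- ===== PORT A =====
def solve (cost : Int) (amount : Int) (noOfBanana : Int) : Int :=
  let billAmount := (PySem.List.pyRange 0 noOfBanana 1).foldl
    (fun billAmount i => billAmount + cost * (i + 1)) 0
  if billAmount > amount then billAmount - amount else 0

-- ===== PORT B =====
def solve_alt (cost : Int) (amount : Int) (noOfBanana : Int) : Int :=
  let n := max noOfBanana 0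
  let total := cost * PySem.Int.floordiv (n * (n + 1)) 2
  max (total - amount) 0

-- ===== PRECONDITION & SPEC =====
def Spec_solve (cost : Int) (amount : Int) (noOfBanana : Int) (out : Int) : Prop := out = solve_alt cost amount noOfBanana
instance (cost : Int) (amount : Int) (noOfBanana : Int) (out : Int) : Decidable (Spec_solve cost amount noOfBanana out) := by unfold Spec_solve; infer_instance

-- ===== CLAIM (what is proved, stated in full; the proofs are below) =====
def Claim_equal_solve : Prop := ∀ (cost : Int) (amount : Int) (noOfBanana : Int), Dom_solve cost amount noOfBanana → Spec_solve cost amount noOfBanana (solve cost amount noOfBanana)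

-- ===== LEMMAS AND PROOFS =====

-- Triangular numbers as a recursion, to characterise A's loop.
def tri : Nat → Int
  | 0 => 0
  | n + 1 => tri n + (n + 1)

theorem loop_eq_tri (cost : Int) : ∀ (n : Nat) (init : Int),
    (PySem.List.pyRange 0 n 1).foldl (fun b i => b + cost * (i + 1)) init
      = init + cost * tri n := by
  intro n
  induction n with
  | zero => intro init; simp [tri]
  | succ m ih =>
      intro init
      have h : ((m : Int) + 1) = ((m + 1 : Nat) : Int) := by push_cast; ring
      rw [show ((m + 1 : Nat) : Int) = (m : Int) + 1 by push_cast; ring,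
        PySem.List.pyRange_one_succ_right (by exact_mod_cast Int.natCast_nonneg m),
        List.foldl_append, ih]
      simp [tri]
      ring

theorem two_mul_tri (n : Nat) : (n : Int) * ((n : Int) + 1) = 2 * tri n := by
  induction n with
  | zero => simp [tri]
  | succ m ih => simp [tri]; push_cast at ih ⊢; linarith

theorem floordiv_tri (n : Nat) :
    PySem.Int.floordiv ((n : Int) * ((n : Int) + 1)) 2 = tri n := by
  rw [two_mul_tri, PySem.Int.floordiv]
  exact Int.mul_fdiv_cancel_left (tri n) (by norm_num)

-- ===== VERDICT (by name: the statement is the Claim_ definition above) =====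
theorem solve_spec : Claim_equal_solve := by
  intro cost amount noOfBanana _
  unfold Spec_solve solve solve_alt
  dsimp only
  by_cases h : noOfBanana ≤ 0
  · rw [PySem.List.pyRange_one_eq_nil h]
    have hm : max noOfBanana 0 = 0 := by omega
    simp [hm, PySem.Int.floordiv]
    omega
  · have hm : max noOfBanana 0 = noOfBanana := by omega
    obtain ⟨n, rfl⟩ : ∃ n : Nat, noOfBanana = (n : Int) :=
      ⟨noOfBanana.toNat, by omega⟩
    rw [loop_eq_tri, hm, floordiv_tri]
    simp only [zero_add]
    omega
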